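-- pv_equiv track=rewrite | github.com/loupsil/decilo | decilo.py | normalize_to_odoo_locale
-- ===== SOURCE A (Python) =====
-- DEFAULT_ODOO_LOCALE = 'fr_BE'
--
-- UI_TO_ODOO_LANG = {
--     'en': 'en_US',
--     'fr': 'fr_BE',  # use installed FR locale
--     # Prefer nl_BE because nl_NL is not installed on the instance
--     'nl': 'nl_BE',
-- }
--
-- def normalize_to_odoo_locale(locale_value):
--     """Normalize various locale inputs to an Odoo-friendly locale code."""
--     if not locale_value:
--         return DEFAULT_ODOO_LOCALE
--     val = str(locale_value).strip()
--     lower_val = val.lower()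
--
--     # If already an Odoo code
--     for v in UI_TO_ODOO_LANG.values():
--         if lower_val == v.lower():
--             return v
--
--     # If UI shorthand
--     mapped = UI_TO_ODOO_LANG.get(lower_val)
--     if mapped:
--         return mapped
--
--     # Accept formats like en-us, fr-be
--     if '-' in lower_val:
--         normalized = lower_val.replace('-', '_')
--         for v in UI_TO_ODOO_LANG.values():
--             if normalized == v.lower():
--                 return v
--
--     return DEFAULT_ODOO_LOCALE
-- ===== SOURCE B (Python) =====
-- DEFAULT_ODOO_LOCALE = 'fr_BE'
--
-- UI_TO_ODOO_LANG = {
--     'en': 'en_US',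
--     'fr': 'fr_BE',
--     'nl': 'nl_BE',
-- }
--
-- def normalize_to_odoo_locale(locale_value):
--     """Normalize various locale inputs to an Odoo-friendly locale code."""
--     if not locale_value:
--         return DEFAULT_ODOO_LOCALE
--     # fold dashes into underscores once, then parse the language prefix and validate
--     key = str(locale_value).strip().lower().replace('-', '_')
--     canonical = UI_TO_ODOO_LANG.get(key[:2])
--     if canonical and key in (key[:2], canonical.lower()):
--         return canonical
--     return DEFAULT_ODOO_LOCALE
-- ===== Notes on version B (the rewrite author's own statement) =====
-- stated objective: simpler
-- what changed: A's three-stage flow (scan over UI_TO_ODOO_LANG.values(), then a shorthand dict get, then a dash-retry re-scan) is replaced by a parse-and-validate: fold dashes into underscores once, look up the two-char language prefix in UI_TO_ODOO_LANG, and accept only if the whole key is that shorthand or the canonical code's lowercase.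
import Mathlib
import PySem

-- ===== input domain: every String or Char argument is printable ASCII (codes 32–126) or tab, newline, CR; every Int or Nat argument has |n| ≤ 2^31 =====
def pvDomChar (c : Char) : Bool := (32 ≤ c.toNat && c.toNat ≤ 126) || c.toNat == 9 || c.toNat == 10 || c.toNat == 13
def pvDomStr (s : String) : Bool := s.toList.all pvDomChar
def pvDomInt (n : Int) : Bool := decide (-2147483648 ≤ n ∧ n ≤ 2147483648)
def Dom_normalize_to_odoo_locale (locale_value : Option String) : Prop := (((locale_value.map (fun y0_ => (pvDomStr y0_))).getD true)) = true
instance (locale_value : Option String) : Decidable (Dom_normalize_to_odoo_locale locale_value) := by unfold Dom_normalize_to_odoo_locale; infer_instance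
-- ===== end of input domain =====

-- B replaces A's scan-over-values / shorthand-get / dash-retry-scan flow by a parse:
-- fold '-' into '_' once, look up the two-char language prefix, validate; objective: simpler.

-- ===== PORT A =====
def pvA_values : List String := ["en_US", "fr_BE", "nl_BE"]

-- 'for v in UI_TO_ODOO_LANG.values(): if x == v.lower(): return v'
def pvA_scan (x : List Char) : Option String :=
  pvA_values.findSome? (fun v => if x = (PySem.Str.lower v).toList then some v else none)

-- the tail of A after both early returns failed: the dash branch, else the default
def pvA_tail (lower_val : List Char) : String :=
  if PySem.Chars.isIn ['-'] lower_val then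
    match pvA_scan (PySem.Chars.replace lower_val ['-'] ['_']) with
    | some v => v
    | none => "fr_BE"
  else "fr_BE"

def pvA_shorthand : PySem.Dict (List Char) String :=
  PySem.Dict.ofList [(['e','n'], "en_US"), (['f','r'], "fr_BE"), (['n','l'], "nl_BE")]

def pvA_core (lower_val : List Char) : String :=
  match pvA_scan lower_val with
  | some v => v
  | none =>
    match pvA_shorthand.get? lower_val with
    | some m => if m.toList.isEmpty then pvA_tail lower_val else m   -- 'if mapped:'
    | none => pvA_tail lower_val

def normalize_to_odoo_locale (locale_value : Option String) : String :=
  match locale_value with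
  | none => "fr_BE"                       -- 'if not locale_value'
  | some s =>
    if s.toList.isEmpty then "fr_BE"      -- empty string is falsy too
    else pvA_core (PySem.Chars.lower (PySem.Chars.strip s.toList))

-- ===== PORT B =====
def pvB_map : PySem.Dict (List Char) String :=
  PySem.Dict.ofList [(['e','n'], "en_US"), (['f','r'], "fr_BE"), (['n','l'], "nl_BE")]

def pvB_core (lower_val : List Char) : String :=
  let key := PySem.Chars.replace lower_val ['-'] ['_']     -- .replace('-', '_')
  let lang := PySem.List.slice key none (some 2)           -- key[:2]
  match pvB_map.get? lang with                             -- UI_TO_ODOO_LANG.get(key[:2])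
  | some canonical =>
      -- 'if canonical and key in (key[:2], canonical.lower()):'
      if canonical.toList.isEmpty = false ∧ (key = lang ∨ key = PySem.Chars.lower canonical.toList)
      then canonical else "fr_BE"
  | none => "fr_BE"

def normalize_to_odoo_locale_alt (locale_value : Option String) : String :=
  match locale_value with
  | none => "fr_BE"
  | some s =>
    if s.toList.isEmpty then "fr_BE"
    else pvB_core (PySem.Chars.lower (PySem.Chars.strip s.toList))

-- ===== PRECONDITION & SPEC =====
def Spec_normalize_to_odoo_locale (locale_value : Option String) (out : String) : Prop := out = normalize_to_odoo_locale_alt locale_value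
instance (locale_value : Option String) (out : String) : Decidable (Spec_normalize_to_odoo_locale locale_value out) := by unfold Spec_normalize_to_odoo_locale; infer_instance

-- ===== CLAIM (what is proved, stated in full; the proofs are below) =====
def Claim_equal_normalize_to_odoo_locale : Prop := ∀ (locale_value : Option String), Dom_normalize_to_odoo_locale locale_value → Spec_normalize_to_odoo_locale locale_value (normalize_to_odoo_locale locale_value)

-- ===== LEMMAS AND PROOFS =====

-- replacing a single char by a single char is a map (shape of the '-'→'_' step)
set_option maxRecDepth 4096 in
theorem pv_replace_go_singleton (a b : Char) (l acc : List Char) (fuel : Nat)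
    (h : l.length ≤ fuel) :
    PySem.Chars.replace.go [a] [b] fuel l acc
      = acc.reverse ++ l.map (fun c => if c = a then b else c) := by
  induction l generalizing fuel acc with
  | nil => cases fuel <;> simp [PySem.Chars.replace.go]
  | cons c t ih =>
    cases fuel with
    | zero => simp at h
    | succ n =>
      simp only [PySem.Chars.replace.go, List.isPrefixOf]
      by_cases hc : c = a
      · simp [hc, ih _ _ (by simpa using h)]
      · have hb : (a == c) = false := beq_eq_false_iff_ne.mpr (Ne.symm hc)
        simp [hb, ih _ _ (by simpa using h), hc]

theorem pv_replace_singleton (a b : Char) (l : List Char) :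
    PySem.Chars.replace l [a] [b] = l.map (fun c => if c = a then b else c) := by
  simp [PySem.Chars.replace, pv_replace_go_singleton a b l [] l.length le_rfl]

-- inverting the '-'-to-'_' fold on each accepted spelling
theorem pv_inv_en (lv : List Char) (h : PySem.Chars.replace lv ['-'] ['_'] = ['e','n']) :
    lv = ['e','n'] := by
  rw [pv_replace_singleton] at h
  have hl : lv.length = 2 := by simpa using congrArg List.length h
  rcases lv with _ | ⟨a, _ | ⟨b, _ | _⟩⟩ <;> simp at hl
  simp only [List.map, List.cons.injEq, and_true] at h
  obtain ⟨h1, h2⟩ := h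
  split_ifs at h1 h2 <;> simp_all

theorem pv_inv_fr (lv : List Char) (h : PySem.Chars.replace lv ['-'] ['_'] = ['f','r']) :
    lv = ['f','r'] := by
  rw [pv_replace_singleton] at h
  have hl : lv.length = 2 := by simpa using congrArg List.length h
  rcases lv with _ | ⟨a, _ | ⟨b, _ | _⟩⟩ <;> simp at hl
  simp only [List.map, List.cons.injEq, and_true] at h
  obtain ⟨h1, h2⟩ := h
  split_ifs at h1 h2 <;> simp_all

theorem pv_inv_nl (lv : List Char) (h : PySem.Chars.replace lv ['-'] ['_'] = ['n','l']) :
    lv = ['n','l'] := by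
  rw [pv_replace_singleton] at h
  have hl : lv.length = 2 := by simpa using congrArg List.length h
  rcases lv with _ | ⟨a, _ | ⟨b, _ | _⟩⟩ <;> simp at hl
  simp only [List.map, List.cons.injEq, and_true] at h
  obtain ⟨h1, h2⟩ := h
  split_ifs at h1 h2 <;> simp_all

theorem pv_inv_enus (lv : List Char) (h : PySem.Chars.replace lv ['-'] ['_'] = ['e','n','_','u','s']) :
    lv = ['e','n','_','u','s'] ∨ lv = ['e','n','-','u','s'] := by
  rw [pv_replace_singleton] at h
  have hl : lv.length = 5 := by simpa using congrArg List.length h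
  rcases lv with _ | ⟨a, _ | ⟨b, _ | ⟨c, _ | ⟨d, _ | ⟨e, _ | _⟩⟩⟩⟩⟩ <;> simp at hl
  simp only [List.map, List.cons.injEq, and_true] at h
  obtain ⟨h1, h2, h3, h4, h5⟩ := h
  split_ifs at h1 h2 h3 h4 h5 <;> simp_all

theorem pv_inv_frbe (lv : List Char) (h : PySem.Chars.replace lv ['-'] ['_'] = ['f','r','_','b','e']) :
    lv = ['f','r','_','b','e'] ∨ lv = ['f','r','-','b','e'] := by
  rw [pv_replace_singleton] at h
  have hl : lv.length = 5 := by simpa using congrArg List.length h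
  rcases lv with _ | ⟨a, _ | ⟨b, _ | ⟨c, _ | ⟨d, _ | ⟨e, _ | _⟩⟩⟩⟩⟩ <;> simp at hl
  simp only [List.map, List.cons.injEq, and_true] at h
  obtain ⟨h1, h2, h3, h4, h5⟩ := h
  split_ifs at h1 h2 h3 h4 h5 <;> simp_all

theorem pv_inv_nlbe (lv : List Char) (h : PySem.Chars.replace lv ['-'] ['_'] = ['n','l','_','b','e']) :
    lv = ['n','l','_','b','e'] ∨ lv = ['n','l','-','b','e'] := by
  rw [pv_replace_singleton] at h
  have hl : lv.length = 5 := by simpa using congrArg List.length h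
  rcases lv with _ | ⟨a, _ | ⟨b, _ | ⟨c, _ | ⟨d, _ | ⟨e, _ | _⟩⟩⟩⟩⟩ <;> simp at hl
  simp only [List.map, List.cons.injEq, and_true] at h
  obtain ⟨h1, h2, h3, h4, h5⟩ := h
  split_ifs at h1 h2 h3 h4 h5 <;> simp_all

-- B's language table characterised
theorem pv_map_get (lang : List Char) (c : String) (h : pvB_map.get? lang = some c) :
    (lang = ['e','n'] ∧ c = "en_US") ∨ (lang = ['f','r'] ∧ c = "fr_BE") ∨ (lang = ['n','l'] ∧ c = "nl_BE") := by
  have ht : pvB_map = PySem.Dict.mk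
      [(['e','n'], "en_US"), (['f','r'], "fr_BE"), (['n','l'], "nl_BE")] := by decide
  rw [ht] at h
  simp only [PySem.Dict.get?_mk_cons] at h
  split_ifs at h <;> simp_all [PySem.Dict.get?]

theorem pv_core_eq (lv : List Char) : pvA_core lv = pvB_core lv := by
  by_cases h1 : lv = ['e','n','_','u','s']; · subst h1; decide
  by_cases h2 : lv = ['f','r','_','b','e']; · subst h2; decide
  by_cases h3 : lv = ['n','l','_','b','e']; · subst h3; decide
  by_cases h4 : lv = ['e','n']; · subst h4; decide
  by_cases h5 : lv = ['f','r']; · subst h5; decide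
  by_cases h6 : lv = ['n','l']; · subst h6; decide
  by_cases h7 : lv = ['e','n','-','u','s']; · subst h7; decide
  by_cases h8 : lv = ['f','r','-','b','e']; · subst h8; decide
  by_cases h9 : lv = ['n','l','-','b','e']; · subst h9; decide
  -- generic case: lv is none of the nine accepted spellings; both sides return "fr_BE"
  have e1 : PySem.Chars.lower ['e','n','_','U','S'] = ['e','n','_','u','s'] := by decide
  have e2 : PySem.Chars.lower ['f','r','_','B','E'] = ['f','r','_','b','e'] := by decide
  have e3 : PySem.Chars.lower ['n','l','_','B','E'] = ['n','l','_','b','e'] := by decide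
  -- the dash-folded key is none of the six lowered spellings (by the inversion lemmas)
  have k1 : PySem.Chars.replace lv ['-'] ['_'] ≠ ['e','n','_','u','s'] := fun h =>
    (pv_inv_enus lv h).elim h1 h7
  have k2 : PySem.Chars.replace lv ['-'] ['_'] ≠ ['f','r','_','b','e'] := fun h =>
    (pv_inv_frbe lv h).elim h2 h8
  have k3 : PySem.Chars.replace lv ['-'] ['_'] ≠ ['n','l','_','b','e'] := fun h =>
    (pv_inv_nlbe lv h).elim h3 h9
  have k4 : PySem.Chars.replace lv ['-'] ['_'] ≠ ['e','n'] := fun h => h4 (pv_inv_en lv h)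
  have k5 : PySem.Chars.replace lv ['-'] ['_'] ≠ ['f','r'] := fun h => h5 (pv_inv_fr lv h)
  have k6 : PySem.Chars.replace lv ['-'] ['_'] ≠ ['n','l'] := fun h => h6 (pv_inv_nl lv h)
  -- A's side is "fr_BE"
  have hAscan : pvA_scan lv = none := by
    simp [pvA_scan, pvA_values, List.findSome?, e1, e2, e3, h1, h2, h3]
  have hAshort : pvA_shorthand.get? lv = none := by
    have ht : pvA_shorthand = PySem.Dict.mk
        [(['e','n'], "en_US"), (['f','r'], "fr_BE"), (['n','l'], "nl_BE")] := by decide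
    rw [ht]
    simp [PySem.Dict.get?, Ne.symm h4, Ne.symm h5, Ne.symm h6]
  have hAtail : pvA_tail lv = "fr_BE" := by
    unfold pvA_tail
    by_cases hdash : PySem.Chars.isIn ['-'] lv = true
    · have hscan2 : pvA_scan (PySem.Chars.replace lv ['-'] ['_']) = none := by
        simp [pvA_scan, pvA_values, List.findSome?, e1, e2, e3, k1, k2, k3]
      simp [hdash, hscan2]
    · simp [hdash]
  have hA : pvA_core lv = "fr_BE" := by
    simp [pvA_core, hAscan, hAshort, hAtail]
  -- B's side is "fr_BE"
  have hB : pvB_core lv = "fr_BE" := by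
    unfold pvB_core
    cases hg : pvB_map.get? (PySem.List.slice (PySem.Chars.replace lv ['-'] ['_']) none (some 2)) with
    | none => simp only [hg]
    | some c =>
      have hcases := pv_map_get _ _ hg
      have hcond : ¬ (c.toList.isEmpty = false ∧
          (PySem.Chars.replace lv ['-'] ['_'] = PySem.List.slice (PySem.Chars.replace lv ['-'] ['_']) none (some 2)
           ∨ PySem.Chars.replace lv ['-'] ['_'] = PySem.Chars.lower c.toList)) := by
        rintro ⟨-, hkey⟩
        rcases hcases with ⟨hl, hc⟩ | ⟨hl, hc⟩ | ⟨hl, hc⟩ <;> subst hc <;>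
          rcases hkey with hk | hk
        · exact k4 (hk.trans hl)
        · exact k1 (hk.trans (by decide))
        · exact k5 (hk.trans hl)
        · exact k2 (hk.trans (by decide))
        · exact k6 (hk.trans hl)
        · exact k3 (hk.trans (by decide))
      simp only [hg]
      rw [if_neg hcond]
  rw [hA, hB]

-- ===== VERDICT (by name: the statement is the Claim_ definition above) =====
theorem normalize_to_odoo_locale_spec : Claim_equal_normalize_to_odoo_locale := by
  intro locale_value _
  unfold Spec_normalize_to_odoo_locale normalize_to_odoo_locale normalize_to_odoo_locale_alt
  cases locale_value with
  | none => rfl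
  | some s =>
    by_cases h : s.toList.isEmpty <;> simp [h, pv_core_eq]
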